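-- pv_equiv track=rewrite | github.com/benrose258/Python | Python 3.6 Files/Classwork/CS 115/hw2.py | counter
-- ===== SOURCE A (Python) =====
-- def counter(myletters,mycounter,mytestingletters,myletter):
--     '''counter takes in a static list of usable letters, a counter, a dynamic list of usable letters (equivalent to myletters upon the
--        first function call), and one single letter that is currently being tested against our list of usable letters. The overall purpose
--        of this function is to tell the rest of the program that when you are using a letter in your total list of letters, the letter is
--        no longer available to be used for the rest of the word. The first if statement is error checking if we have very specific conditions:
--        if our list of possible letters to test consists of just one letter, we have not tested any letters (meaning that our list had one
--        and only one letter since the function ran) and the letter is equal to the character in the list of possible letters, then just return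
--        that letter/word. This is covering the only two possible and necessary cases where this error handling is neccessary: if the word is
--        "i" or the word is "a" and we only had "i" or "a" in the possible numbers we could use. If it is, it is the only time this function
--        will return a letter instead of a numerical value. Otherwise, the program will run through the list of letters provided until it finds
--        the correct letter. The reason we don't have a base case where the letter is not in our possible letters is in the function this
--        function will be applied, counter will only be run if we detect that a letter in our provided letters is equal to a letter in the word.
--        If not, there is no reason to make a revised version of our total remaining letters as it will remain the same. This function will
--        return our new list of remaining letters without the letter we just used.'''
--     if len(mytestingletters) == 1 and mytestingletters[0] == myletter and mycounter == 0:
--         return myletters[:-1]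
--     elif mytestingletters[0] == myletter:
--         return myletters[0:mycounter] + mytestingletters[1:]
--     else:
--         mycounter = mycounter + 1
--         return counter(myletters,mycounter,mytestingletters[1:],myletter)
-- ===== SOURCE B (Python) =====
-- def counter(myletters, mycounter, mytestingletters, myletter):
--     i = 0
--     while mytestingletters[i] != myletter:
--         i += 1
--     if i == len(mytestingletters) - 1 and mycounter + i == 0:
--         return myletters[:-1]
--     return myletters[0:mycounter + i] + mytestingletters[i + 1:]
-- ===== Notes on version B (the rewrite author's own statement) =====
-- stated objective: alternative
-- what changed: Replaces A's accumulator-passing recursion (which rebuilds the testing list with a slice at every step) with a single flat index loop that finds the first occurrence, then computes the result with one slice/concatenation.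
import Mathlib
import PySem

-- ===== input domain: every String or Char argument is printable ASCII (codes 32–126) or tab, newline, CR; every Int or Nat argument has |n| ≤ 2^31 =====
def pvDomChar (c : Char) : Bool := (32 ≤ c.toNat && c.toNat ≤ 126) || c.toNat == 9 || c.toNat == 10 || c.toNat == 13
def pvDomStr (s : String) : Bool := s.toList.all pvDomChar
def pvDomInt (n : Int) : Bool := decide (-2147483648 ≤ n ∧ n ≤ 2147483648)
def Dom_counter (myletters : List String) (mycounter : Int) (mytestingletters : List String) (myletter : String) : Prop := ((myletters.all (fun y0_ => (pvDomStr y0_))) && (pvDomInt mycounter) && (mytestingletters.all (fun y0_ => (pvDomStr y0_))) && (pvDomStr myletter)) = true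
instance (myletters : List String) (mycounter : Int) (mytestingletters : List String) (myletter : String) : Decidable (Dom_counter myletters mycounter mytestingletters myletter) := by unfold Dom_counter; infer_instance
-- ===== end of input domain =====

-- B replaces A's accumulator-passing recursion with a flat first-occurrence index loop plus one slice; return values only (no mutation in either program).

-- ===== PORT A =====
-- A recurses on mytestingletters[1:]; the [] case is Python's IndexError (excluded by Pre_counter).
def counter (myletters : List String) (mycounter : Int) (mytestingletters : List String) (myletter : String) : List String :=
  match mytestingletters with
  | [] => []  -- Python raises IndexError (mytestingletters[0]); outside Pre_counter
  | h :: t =>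
    if mytestingletters.length == 1 && h == myletter && mycounter == 0 then
      PySem.List.slice myletters none (some (-1))
    else if h == myletter then
      PySem.List.slice myletters (some 0) (some mycounter) ++ t
    else
      counter myletters (mycounter + 1) t myletter

-- ===== PORT B =====
-- B's 'i = 0; while mytestingletters[i] != myletter: i += 1' as a scan carrying the index i.
def counterAltFind (l : List String) (myletter : String) (i : Nat) : Option Nat :=
  match l with
  | [] => none  -- the while loop runs off the end: Python IndexError; outside Pre_counter
  | h :: t => if h == myletter then some i else counterAltFind t myletter (i + 1)

def counter_alt (myletters : List String) (mycounter : Int) (mytestingletters : List String) (myletter : String) : List String :=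
  match counterAltFind mytestingletters myletter 0 with
  | none => []  -- Python raises IndexError; outside Pre_counter
  | some i =>
    if i == mytestingletters.length - 1 && mycounter + (i : Int) == 0 then
      PySem.List.slice myletters none (some (-1))
    else
      PySem.List.slice myletters (some 0) (some (mycounter + (i : Int))) ++ mytestingletters.drop (i + 1)

-- ===== PRECONDITION & SPEC =====
-- Pre_counter: exactly the inputs where A returns; if myletter is absent both Pythons raise IndexError.
def Pre_counter (myletters : List String) (mycounter : Int) (mytestingletters : List String) (myletter : String) : Prop :=
  myletter ∈ mytestingletters
instance (myletters : List String) (mycounter : Int) (mytestingletters : List String) (myletter : String) : Decidable (Pre_counter myletters mycounter mytestingletters myletter) := by unfold Pre_counter; infer_instance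
def pvWitness_counter : List String × Int × List String × String := (["a", "b", "c"], 0, ["a", "b", "c"], "b")

def Spec_counter (myletters : List String) (mycounter : Int) (mytestingletters : List String) (myletter : String) (out : List String) : Prop := out = counter_alt myletters mycounter mytestingletters myletter
instance (myletters : List String) (mycounter : Int) (mytestingletters : List String) (myletter : String) (out : List String) : Decidable (Spec_counter myletters mycounter mytestingletters myletter out) := by unfold Spec_counter; infer_instance

-- ===== CLAIM (what is proved, stated in full; the proofs are below) =====
def Claim_equal_counter : Prop := ∀ (myletters : List String) (mycounter : Int) (mytestingletters : List String) (myletter : String), Dom_counter myletters mycounter mytestingletters myletter → Pre_counter myletters mycounter mytestingletters myletter → Spec_counter myletters mycounter mytestingletters myletter (counter myletters mycounter mytestingletters myletter)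

-- ===== LEMMAS AND PROOFS =====

-- counterAltFind with a shifted start index.
theorem counterAltFind_shift (l : List String) (s : String) (i : Nat) :
    counterAltFind l s i = (counterAltFind l s 0).map (· + i) := by
  induction l generalizing i with
  | nil => simp [counterAltFind]
  | cons h t ih =>
    simp only [counterAltFind]
    by_cases hh : h == s
    · simp [hh]
    · simp only [hh, if_false, Bool.false_eq_true]
      rw [ih (i + 1), ih 1]
      cases counterAltFind t s 0 <;> simp <;> omega

theorem counterAltFind_mem (l : List String) (s : String) (hs : s ∈ l) :
    ∃ j, counterAltFind l s 0 = some j ∧ j < l.length := by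
  induction l with
  | nil => cases hs
  | cons h t ih =>
    simp only [counterAltFind]
    by_cases hh : h == s
    · exact ⟨0, by simp [hh], by simp⟩
    · have hs' : s ∈ t := by
        rcases List.mem_cons.mp hs with h1 | h1
        · exact absurd (by simp [h1] : h == s) hh
        · exact h1
      rcases ih hs' with ⟨j, hj, hjl⟩
      refine ⟨j + 1, ?_, by simp; omega⟩
      simp [hh, counterAltFind_shift t s 1, hj]

theorem counter_eq_alt (myletters : List String) (mytestingletters : List String)
    (mycounter : Int) (myletter : String) (hmem : myletter ∈ mytestingletters) :
    counter myletters mycounter mytestingletters myletter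
      = counter_alt myletters mycounter mytestingletters myletter := by
  induction mytestingletters generalizing mycounter with
  | nil => cases hmem
  | cons h t ih =>
    by_cases hh : h == myletter
    · -- first match at index 0
      have hfind : counterAltFind (h :: t) myletter 0 = some 0 := by simp [counterAltFind, hh]
      simp only [counter, counter_alt, hfind]
      by_cases hlen : (h :: t).length == 1 && (h == myletter) && mycounter == 0
      · have h1 : (h :: t).length = 1 := by
          simp only [Bool.and_eq_true, beq_iff_eq] at hlen; exact hlen.1.1
        have hc0 : mycounter = 0 := by
          simp only [Bool.and_eq_true, beq_iff_eq] at hlen; exact hlen.2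
        have ht : t = [] := by simpa using h1
        simp [ht, hc0, hh]
      · simp only [hlen, if_false, Bool.false_eq_true]
        simp only [hh, if_true]
        have hne : ¬((0 : Nat) == (h :: t).length - 1 && mycounter + ((0 : Nat) : Int) == 0) := by
          intro hcon
          apply hlen
          simp only [Bool.and_eq_true, beq_iff_eq] at hcon ⊢
          have : t.length = 0 := by
            have := hcon.1; simp at this; omega
          refine ⟨⟨by simp [this], by simpa using hh⟩, by simpa using hcon.2⟩
        simp only [hne, if_false, Bool.false_eq_true]
        simp
    · -- h ≠ myletter: A recurses; B's index shifts by one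
      have hmem' : myletter ∈ t := by
        rcases List.mem_cons.mp hmem with h1 | h1
        · exact absurd (by simp [h1] : h == myletter) hh
        · exact h1
      have hlen1 : ¬((h :: t).length == 1 && (h == myletter) && mycounter == 0) := by
        simp [hh]
      simp only [counter, hlen1, hh, if_false, Bool.false_eq_true]
      rw [ih (mycounter + 1) hmem']
      -- now relate counter_alt on (h :: t) with counter_alt on t
      rcases counterAltFind_mem t myletter hmem' with ⟨j, hj, hjl⟩
      have hfind : counterAltFind (h :: t) myletter 0 = some (j + 1) := by
        simp [counterAltFind, hh, counterAltFind_shift t myletter 1, hj]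
      simp only [counter_alt, hfind, hj]
      have hidx : ((j + 1 : Nat) == (h :: t).length - 1) = (j == t.length - 1) := by
        simp only [List.length_cons]
        by_cases hje : j = t.length - 1
        · simp [hje]; omega
        · have h2 : ¬(j + 1 = t.length + 1 - 1) := by omega
          have h3 : ¬(j + 1 = t.length) := by omega
          simp [hje, h2, h3]
      have hsum : mycounter + ((j + 1 : Nat) : Int) = mycounter + 1 + (j : Int) := by push_cast; ring
      rw [hidx, hsum]
      by_cases hcase : (j == t.length - 1 && mycounter + 1 + (j : Int) == 0)
      · simp [hcase]
      · simp only [hcase, if_false, Bool.false_eq_true]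
        simp

-- ===== VERDICT (by name: the statement is the Claim_ definition above) =====
theorem counter_spec : Claim_equal_counter := by
  intro myletters mycounter mytestingletters myletter _ hpre
  unfold Spec_counter
  exact counter_eq_alt myletters mytestingletters mycounter myletter hpre
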